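-- pv_equiv track=rewrite | github.com/x-meowzilla/CSCA08-A48 | CSCA48/07_MoreRecursion/palindrome.py | is_near_palindrome3
-- ===== SOURCE A (Python) =====
-- def is_near_palindrome3(s, d=1):
--     ''' (str, int) -> bool
--     Return True iff s is within d changes of being a palindrome.
--     REQ: d >= 0.
--
--     >>> is_near_palindrome3("naval", 1)
--     True
--     >>> is_near_palindrome3("naval")
--     True
--     >>> is_near_palindrome3("palindrome", 4)
--     False
--     >>> is_near_palindrome3("palindrome", 5)
--     True
--     '''
--     # if s is empty
--     if not s:
--         result = True
--     elif s[0] == s[-1]: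
--         result = is_near_palindrome3(s[1:-1], d)
--     elif d > 0:
--         result = is_near_palindrome3(s[1:-1], d - 1)
--     else:
--         result = False
--     return result
-- ===== SOURCE B (Python) =====
-- def is_near_palindrome3(s, d=1):
--     n = len(s)
--     mismatches = sum(1 for i in range(n // 2) if s[i] != s[n - 1 - i])
--     return mismatches == 0 or mismatches <= d
-- ===== Notes on version B (the rewrite author's own statement) =====
-- stated objective: faster
-- what changed: Replaced A's recursion that slices a fresh copy of the string for every symmetric pair with a single index-based scan that counts mismatched pairs s[i] != s[n-1-i] and compares the count to d.
import Mathlib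
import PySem

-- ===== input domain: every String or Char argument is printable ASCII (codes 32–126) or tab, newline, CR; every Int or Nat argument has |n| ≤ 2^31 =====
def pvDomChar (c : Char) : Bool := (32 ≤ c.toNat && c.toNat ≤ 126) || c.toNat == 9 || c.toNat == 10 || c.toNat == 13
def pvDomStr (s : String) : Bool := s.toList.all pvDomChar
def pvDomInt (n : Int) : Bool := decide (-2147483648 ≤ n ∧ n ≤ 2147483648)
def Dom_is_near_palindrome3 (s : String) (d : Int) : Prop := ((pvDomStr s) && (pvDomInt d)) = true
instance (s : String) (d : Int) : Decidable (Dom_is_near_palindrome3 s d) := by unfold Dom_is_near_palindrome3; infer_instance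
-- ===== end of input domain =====

-- B replaces A's O(n^2) recursive slicing with a single O(n) index scan counting symmetric mismatches.

-- ===== PORT A =====
-- s[1:-1] as a list operation (cited by the recursion's termination proof)
theorem pvSliceMid (cs : List Char) (h : cs ≠ []) :
    PySem.List.slice cs (some 1) (some (-1)) = cs.tail.dropLast := by
  cases cs with
  | nil => simp at h
  | cons x xs =>
    simp [PySem.List.slice, PySem.List.clampIdx, List.dropLast_eq_take]
    split <;> omega

theorem pvMidLen (cs : List Char) (h : cs ≠ []) : cs.tail.dropLast.length < cs.length := by
  cases cs with
  | nil => simp at h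
  | cons x xs => simp

-- A's recursion, on the character list of s
def pvARec (cs : List Char) (d : Int) : Bool :=
  if h : cs = [] then true
  else if PySem.List.pyGetD cs 0 ' ' = PySem.List.pyGetD cs (-1) ' ' then
    pvARec (PySem.List.slice cs (some 1) (some (-1))) d
  else if d > 0 then
    pvARec (PySem.List.slice cs (some 1) (some (-1))) (d - 1)
  else false
termination_by cs.length
decreasing_by
  · rw [pvSliceMid cs h]; exact pvMidLen cs h
  · rw [pvSliceMid cs h]; exact pvMidLen cs h

def is_near_palindrome3 (s : String) (d : Int) : Bool := pvARec s.toList d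

-- ===== PORT B =====
-- number of indices i < n//2 with s[i] != s[n-1-i]
def pvMis (cs : List Char) : Nat :=
  (List.range (cs.length / 2)).countP
    (fun i => !(cs.getD i ' ' == cs.getD (cs.length - 1 - i) ' '))

def is_near_palindrome3_alt (s : String) (d : Int) : Bool :=
  (pvMis s.toList == 0) || decide ((pvMis s.toList : Int) ≤ d)

-- ===== PRECONDITION & SPEC =====
def Spec_is_near_palindrome3 (s : String) (d : Int) (out : Bool) : Prop := out = is_near_palindrome3_alt s d
instance (s : String) (d : Int) (out : Bool) : Decidable (Spec_is_near_palindrome3 s d out) := by unfold Spec_is_near_palindrome3; infer_instance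

-- ===== CLAIM (what is proved, stated in full; the proofs are below) =====
def Claim_equal_is_near_palindrome3 : Prop := ∀ (s : String) (d : Int), Dom_is_near_palindrome3 s d → Spec_is_near_palindrome3 s d (is_near_palindrome3 s d)

-- ===== LEMMAS AND PROOFS =====

theorem pvMis_nil : pvMis [] = 0 := rfl

theorem pvMis_single (c : Char) : pvMis [c] = 0 := by simp [pvMis]

-- peeling the outer pair off the mismatch count
theorem pvMis_peel (a b : Char) (mid : List Char) :
    pvMis (a :: (mid ++ [b])) = (if a = b then 0 else 1) + pvMis mid := by
  unfold pvMis
  have hlen : (a :: (mid ++ [b])).length = mid.length + 2 := by simp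
  rw [hlen]
  have hdiv : (mid.length + 2) / 2 = mid.length / 2 + 1 := by omega
  rw [hdiv, List.range_succ_eq_map, List.countP_cons, List.countP_map]
  have h0 : (a :: (mid ++ [b])).getD 0 ' ' = a := rfl
  have hn : (a :: (mid ++ [b])).getD (mid.length + 2 - 1 - 0) ' ' = b := by
    have he : mid.length + 2 - 1 - 0 = mid.length + 1 := by omega
    rw [he, List.getD_cons_succ]
    simp [List.getD]
  have hcongr :
      (List.range (mid.length / 2)).countP
        ((fun i => !((a :: (mid ++ [b])).getD i ' ' == (a :: (mid ++ [b])).getD (mid.length + 2 - 1 - i) ' ')) ∘ Nat.succ)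
      = (List.range (mid.length / 2)).countP
        (fun i => !(mid.getD i ' ' == mid.getD (mid.length - 1 - i) ' ')) := by
    apply List.countP_congr
    intro i hi
    have hi' : i < mid.length / 2 := List.mem_range.mp hi
    have him : i < mid.length := by omega
    have h1 : (a :: (mid ++ [b])).getD (Nat.succ i) ' ' = mid.getD i ' ' := by
      rw [List.getD_cons_succ]
      simp [List.getD, List.getElem?_append_left him]
    have h2 : (a :: (mid ++ [b])).getD (mid.length + 2 - 1 - Nat.succ i) ' ' = mid.getD (mid.length - 1 - i) ' ' := by
      have he : mid.length + 2 - 1 - Nat.succ i = (mid.length - i - 1) + 1 := by omega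
      have he2 : mid.length - i - 1 = mid.length - 1 - i := by omega
      rw [he, List.getD_cons_succ, he2]
      simp [List.getD, List.getElem?_append_left (show mid.length - 1 - i < mid.length by omega)]
    simp only [Function.comp_apply]
    rw [h1, h2]
  rw [hcongr, h0, hn]
  by_cases hab : a = b <;> simp [hab] <;> omega

-- A's recursion computes exactly B's mismatch test
theorem pvARec_eq (n : Nat) : ∀ (cs : List Char) (d : Int), cs.length ≤ n →
    pvARec cs d = ((pvMis cs == 0) || decide ((pvMis cs : Int) ≤ d)) := by
  induction n with
  | zero =>
    intro cs d hle
    have : cs = [] := List.eq_nil_of_length_eq_zero (by omega)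
    subst this
    rw [pvARec]; simp [pvMis_nil]
  | succ n ih =>
    intro cs d hle
    cases cs with
    | nil => rw [pvARec]; simp [pvMis_nil]
    | cons x xs =>
      rcases List.eq_nil_or_concat xs with rfl | ⟨ys, y, rfl⟩
      · -- single character: s[0] == s[-1] and the middle is empty
        rw [pvARec]
        simp only [reduceDIte, reduceCtorEq]
        have heq : PySem.List.pyGetD [x] (0 : Int) ' ' = PySem.List.pyGetD [x] (-1) ' ' := by
          simp [PySem.List.pyGetD, PySem.List.pyGet?, PySem.List.pyIdx?]
        rw [if_pos heq, pvSliceMid [x] (by simp)]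
        simp [pvARec, pvMis_single]
      · -- at least two characters: cs = x :: ys ++ [y]
        simp only [List.concat_eq_append] at hle ⊢
        have hne : (x :: (ys ++ [y])) ≠ [] := by simp
        have hpos : (0 : Int) ≤ (ys.length : Int) + 1 := by positivity
        have hg0 : PySem.List.pyGetD (x :: (ys ++ [y])) (0 : Int) ' ' = x := by
          simp [PySem.List.pyGetD, PySem.List.pyGet?, PySem.List.pyIdx?]
          rw [if_pos hpos]
          simp
        have hgl : PySem.List.pyGetD (x :: (ys ++ [y])) (-1) ' ' = y := by
          simp [PySem.List.pyGetD, PySem.List.pyGet?, PySem.List.pyIdx?]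
        have hmid : PySem.List.slice (x :: (ys ++ [y])) (some 1) (some (-1)) = ys := by
          rw [pvSliceMid _ hne]; simp
        have hys : ys.length ≤ n := by simp at hle; omega
        rw [pvARec]
        simp only [reduceDIte, reduceCtorEq]
        rw [hg0, hgl, hmid, pvMis_peel]
        by_cases hxy : x = y
        · rw [if_pos hxy, if_pos hxy, ih ys d hys]
          simp
        · rw [if_neg hxy, if_neg hxy]
          by_cases hd : d > 0
          · rw [if_pos hd, ih ys (d - 1) hys]
            by_cases hm : pvMis ys = 0
            · simp [hm]; omega
            · have h1 : ((pvMis ys : Int) ≤ d - 1) ↔ (1 + (pvMis ys : Int) ≤ d) := by omega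
              have e1 : (pvMis ys == 0) = false := by simp [hm]
              have e2 : (1 + pvMis ys == 0) = false := by simp
              simp [h1, e1, e2]
          · rw [if_neg hd]
            have hfalse : ¬ ((1 : Int) + (pvMis ys : Int) ≤ d) := by omega
            simp [hfalse]

-- ===== VERDICT (by name: the statement is the Claim_ definition above) =====
theorem is_near_palindrome3_spec : Claim_equal_is_near_palindrome3 := by
  intro s d _
  unfold Spec_is_near_palindrome3 is_near_palindrome3 is_near_palindrome3_alt
  exact pvARec_eq s.toList.length s.toList d le_rfl
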